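-- pv_equiv track=rewrite | github.com/exodos-harry-zorn/loxberry-wmbusmeters-plugin | webfrontend/htmlauth/content.py | build_existing_meter_maps
-- ===== SOURCE A (Python) =====
-- def normalize_meter_id(raw_id):
--     return str(raw_id or '').strip()
--
-- def build_existing_meter_maps(cfg):
--     by_id = {}
--     names = set()
--     duplicate_ids = set()
--     for idx, meter in enumerate(cfg.get('meters', [])):
--         meter_id = normalize_meter_id(meter.get('id'))
--         if meter_id:
--             if meter_id in by_id:
--                 duplicate_ids.add(meter_id)
--             else:
--                 by_id[meter_id] = idx
--         names.add(str(meter.get('name', '')).strip())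
--     return by_id, names, sorted(duplicate_ids)
-- ===== SOURCE B (Python) =====
-- def normalize_meter_id(raw_id):
--     return str(raw_id or '').strip()
--
-- def build_existing_meter_maps(cfg):
--     meters = cfg.get('meters', [])
--     counts = {}
--     for meter in meters:
--         meter_id = normalize_meter_id(meter.get('id'))
--         if meter_id:
--             counts[meter_id] = counts.get(meter_id, 0) + 1
--     by_id = {}
--     names = set()
--     for idx, meter in enumerate(meters):
--         meter_id = normalize_meter_id(meter.get('id'))
--         if meter_id:
--             by_id.setdefault(meter_id, idx)
--         names.add(str(meter.get('name', '')).strip())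
--     return by_id, names, sorted(mid for mid, c in counts.items() if c > 1)
-- ===== Notes on version B (the rewrite author's own statement) =====
-- stated objective: alternative
-- what changed: A detects duplicates inline in a single pass with a 'seen' dict; B first builds a frequency table of the nonempty normalized ids and derives the sorted duplicate list from entries with count > 1, then runs a separate setdefault pass for by_id and the names set.
import Mathlib
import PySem

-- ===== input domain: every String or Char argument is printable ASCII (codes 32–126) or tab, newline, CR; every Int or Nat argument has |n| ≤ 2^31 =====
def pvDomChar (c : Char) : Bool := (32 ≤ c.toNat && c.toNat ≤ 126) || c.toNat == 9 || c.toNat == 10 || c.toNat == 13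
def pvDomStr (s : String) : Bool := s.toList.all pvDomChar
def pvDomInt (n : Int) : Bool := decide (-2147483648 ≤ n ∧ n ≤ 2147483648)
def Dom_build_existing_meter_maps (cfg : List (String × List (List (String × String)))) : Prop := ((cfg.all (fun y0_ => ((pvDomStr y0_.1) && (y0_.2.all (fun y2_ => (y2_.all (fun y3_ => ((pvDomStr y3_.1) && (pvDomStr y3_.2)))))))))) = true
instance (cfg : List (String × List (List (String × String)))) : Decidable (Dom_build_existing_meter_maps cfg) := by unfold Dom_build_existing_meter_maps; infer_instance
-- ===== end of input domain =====

-- B replaces A's inline duplicate detection by a frequency-table pass (counts first, then a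
-- setdefault assignment pass); objective: alternative decomposition, same asymptotic cost.

-- ===== PORT A =====
def normalize_meter_id (raw_id : Option String) : String :=
  PySem.Str.strip (raw_id.getD "")

-- loop body of A's single pass over enumerate(meters)
def pvAStep (st : PySem.Dict String Int × PySem.Set String × PySem.Set String)
    (p : Int × List (String × String)) :
    PySem.Dict String Int × PySem.Set String × PySem.Set String :=
  let meter_id := normalize_meter_id ((PySem.Dict.mk p.2).get? "id")
  let st1 :=
    if meter_id ≠ "" then
      if st.1.contains meter_id then (st.1, st.2.1, PySem.Set.add st.2.2 meter_id)
      else (st.1.insert meter_id p.1, st.2.1, st.2.2)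
    else st
  (st1.1, PySem.Set.add st1.2.1 (PySem.Str.strip (((PySem.Dict.mk p.2).get? "name").getD "")),
   st1.2.2)

def build_existing_meter_maps (cfg : List (String × List (List (String × String)))) :
    (List (String × Int)) × List String × List String :=
  let st := (PySem.List.enumerate ((PySem.Dict.mk cfg).getD "meters" [])).foldl pvAStep
      (PySem.Dict.empty, PySem.Set.empty, PySem.Set.empty)
  (st.1.items, st.2.1, PySem.List.sorted st.2.2 (fun x => x))

-- ===== PORT B =====
def normalize_meter_id_alt (raw_id : Option String) : String :=
  PySem.Str.strip (raw_id.getD "")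

-- B pass 1: frequency table of the nonempty normalized ids
def pvCountStep (c : PySem.Dict String Int) (m : List (String × String)) :
    PySem.Dict String Int :=
  let meter_id := normalize_meter_id_alt ((PySem.Dict.mk m).get? "id")
  if meter_id ≠ "" then c.insert meter_id (c.getD meter_id 0 + 1) else c

-- B pass 2: by_id via setdefault (first index wins) and the names set
def pvBStep (st : PySem.Dict String Int × PySem.Set String)
    (p : Int × List (String × String)) : PySem.Dict String Int × PySem.Set String :=
  let meter_id := normalize_meter_id_alt ((PySem.Dict.mk p.2).get? "id")
  let by_id := if meter_id ≠ "" then st.1.setdefault meter_id p.1 else st.1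
  (by_id, PySem.Set.add st.2 (PySem.Str.strip (((PySem.Dict.mk p.2).get? "name").getD "")))

def build_existing_meter_maps_alt (cfg : List (String × List (List (String × String)))) :
    (List (String × Int)) × List String × List String :=
  let meters := (PySem.Dict.mk cfg).getD "meters" []
  let counts := meters.foldl pvCountStep PySem.Dict.empty
  let st := (PySem.List.enumerate meters).foldl pvBStep (PySem.Dict.empty, PySem.Set.empty)
  (st.1.items, st.2,
   PySem.List.sorted ((counts.items.filter (fun p => decide (1 < p.2))).map (·.1)) (fun x => x))

-- ===== PRECONDITION & SPEC =====
def Spec_build_existing_meter_maps (cfg : List (String × List (List (String × String)))) (out : (List (String × Int)) × List String × List String) : Prop := out = build_existing_meter_maps_alt cfg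
instance (cfg : List (String × List (List (String × String)))) (out : (List (String × Int)) × List String × List String) : Decidable (Spec_build_existing_meter_maps cfg out) := by unfold Spec_build_existing_meter_maps; infer_instance

-- ===== CLAIM (what is proved, stated in full; the proofs are below) =====
def Claim_equal_build_existing_meter_maps : Prop := ∀ (cfg : List (String × List (List (String × String)))), Dom_build_existing_meter_maps cfg → Spec_build_existing_meter_maps cfg (build_existing_meter_maps cfg)

-- ===== LEMMAS AND PROOFS =====

-- the nonempty normalized ids of a meter list
def pvIds (l : List (List (String × String))) : List String :=
  (l.map (fun m => normalize_meter_id ((PySem.Dict.mk m).get? "id"))).filter (fun s => s ≠ "")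

-- ids of the enumerated list
def pvIdsE (l : List (Int × List (String × String))) : List String := pvIds (l.map (·.2))

-- B's normalizer is A's normalizer
theorem pvNorm_eq (r : Option String) : normalize_meter_id_alt r = normalize_meter_id r := rfl

-- one step of A, projected to (by_id, names), is one step of B's second pass
theorem pvAB_step (d : PySem.Dict String Int) (n s : PySem.Set String)
    (p : Int × List (String × String)) :
    ((pvAStep (d, n, s) p).1, (pvAStep (d, n, s) p).2.1) = pvBStep (d, n) p := by
  unfold pvAStep pvBStep normalize_meter_id_alt normalize_meter_id
  by_cases hmid : PySem.Str.strip (((PySem.Dict.mk p.2).get? "id").getD "") = ""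
  · simp [hmid]
  · by_cases hc : (PySem.Dict.contains d (PySem.Str.strip (((PySem.Dict.mk p.2).get? "id").getD ""))) = true
    · simp [hmid, hc, PySem.Dict.setdefault_of_contains _ _ hc]
    · simp [hmid, hc, PySem.Dict.setdefault_of_not_contains _ _ (by simpa using hc)]

-- A's (by_id, names) components step exactly as B's second pass, whatever the dup component is
theorem pvA_proj (l : List (Int × List (String × String)))
    (d : PySem.Dict String Int) (n s : PySem.Set String) :
    ((l.foldl pvAStep (d, n, s)).1, (l.foldl pvAStep (d, n, s)).2.1)
      = l.foldl pvBStep (d, n) := by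
  induction l generalizing d n s with
  | nil => rfl
  | cons p t ih =>
    simp only [List.foldl_cons]
    have h := pvAB_step d n s p
    rcases hA : pvAStep (d, n, s) p with ⟨d', n', s'⟩
    rw [hA] at h
    rw [← h]
    exact ih d' n' s'

-- B's first pass is the counter of the nonempty normalized ids
theorem pvCounts_eq (l : List (List (String × String))) :
    l.foldl pvCountStep PySem.Dict.empty = PySem.Dict.counter (pvIds l) := by
  rw [← PySem.Dict.foldl_insert_getD_add_one_eq_counter]
  generalize PySem.Dict.empty = c
  induction l generalizing c with
  | nil => rfl
  | cons m t ih =>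
    simp only [List.foldl_cons]
    by_cases hmid : normalize_meter_id ((PySem.Dict.mk m).get? "id") = ""
    · rw [show pvCountStep c m = c by simp [pvCountStep, pvNorm_eq, hmid]]
      rw [ih, show pvIds (m :: t) = pvIds t by simp [pvIds, hmid]]
    · rw [show pvIds (m :: t) = normalize_meter_id ((PySem.Dict.mk m).get? "id") :: pvIds t by
        simp [pvIds, hmid], List.foldl_cons, ih]
      congr 1
      simp [pvCountStep, pvNorm_eq, hmid]

-- membership in A's duplicate set
theorem pvA_dups_mem (l : List (Int × List (String × String)))
    (d : PySem.Dict String Int) (n s : PySem.Set String) (x : String) :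
    x ∈ (l.foldl pvAStep (d, n, s)).2.2
      ↔ x ∈ s ∨ (d.contains x = true ∧ x ∈ pvIdsE l) ∨ 2 ≤ (pvIdsE l).count x := by
  induction l generalizing d n s with
  | nil => simp [pvIdsE, pvIds]
  | cons p t ih =>
    simp only [List.foldl_cons]
    by_cases hmid : normalize_meter_id ((PySem.Dict.mk p.2).get? "id") = ""
    · rw [show pvAStep (d, n, s) p
          = (d, PySem.Set.add n (PySem.Str.strip (((PySem.Dict.mk p.2).get? "name").getD "")), s) by
        simp [pvAStep, hmid]]
      rw [ih]
      simp [pvIdsE, pvIds, hmid]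
    · have hids : pvIdsE (p :: t)
          = normalize_meter_id ((PySem.Dict.mk p.2).get? "id") :: pvIdsE t := by
        simp [pvIdsE, pvIds, hmid]
      by_cases hc : (PySem.Dict.contains d (normalize_meter_id ((PySem.Dict.mk p.2).get? "id"))) = true
      · rw [show pvAStep (d, n, s) p
            = (d, PySem.Set.add n (PySem.Str.strip (((PySem.Dict.mk p.2).get? "name").getD "")),
               PySem.Set.add s (normalize_meter_id ((PySem.Dict.mk p.2).get? "id"))) by
          simp [pvAStep, hmid, hc]]
        rw [ih, hids]
        by_cases hx : x = normalize_meter_id ((PySem.Dict.mk p.2).get? "id")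
        · subst hx; simp [PySem.Set.mem_add, hc]
        · simp [PySem.Set.mem_add, hx, Ne.symm hx]
      · rw [show pvAStep (d, n, s) p
            = (d.insert (normalize_meter_id ((PySem.Dict.mk p.2).get? "id")) p.1,
               PySem.Set.add n (PySem.Str.strip (((PySem.Dict.mk p.2).get? "name").getD "")), s) by
          simp [pvAStep, hmid, hc]]
        rw [ih, hids]
        by_cases hx : x = normalize_meter_id ((PySem.Dict.mk p.2).get? "id")
        · subst hx
          have hins : (PySem.Dict.contains
              (d.insert (normalize_meter_id ((PySem.Dict.mk p.2).get? "id")) p.1)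
              (normalize_meter_id ((PySem.Dict.mk p.2).get? "id"))) = true := by
            simp
          have hm : normalize_meter_id ((PySem.Dict.mk p.2).get? "id") ∈ pvIdsE t
              ↔ 0 < (pvIdsE t).count (normalize_meter_id ((PySem.Dict.mk p.2).get? "id")) :=
            List.count_pos_iff.symm
          simp only [hins, hc, List.count_cons_self, true_and, List.mem_cons]
          rw [hm]
          constructor
          · rintro (h | h | h)
            · exact Or.inl h
            · exact Or.inr (Or.inr (by omega))
            · exact Or.inr (Or.inr (by omega))
          · rintro (h | ⟨hf, -⟩ | h)
            · exact Or.inl h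
            · exact absurd hf (by simp)
            · by_cases h1 : 2 ≤ List.count (normalize_meter_id ((PySem.Dict.mk p.2).get? "id")) (pvIdsE t)
              · exact Or.inr (Or.inr h1)
              · exact Or.inr (Or.inl (by omega))
        · have hins : (PySem.Dict.contains
              (d.insert (normalize_meter_id ((PySem.Dict.mk p.2).get? "id")) p.1) x)
              = d.contains x := by
            simp [PySem.Dict.contains_insert, hx]
          rw [hins]
          simp [hx, Ne.symm hx]

-- A's duplicate set stays duplicate-free
theorem pvA_dups_nodup (l : List (Int × List (String × String)))
    (d : PySem.Dict String Int) (n s : PySem.Set String) (hs : s.Nodup) :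
    ((l.foldl pvAStep (d, n, s)).2.2).Nodup := by
  induction l generalizing d n s with
  | nil => exact hs
  | cons p t ih =>
    simp only [List.foldl_cons]
    by_cases hmid : normalize_meter_id ((PySem.Dict.mk p.2).get? "id") = ""
    · rw [show pvAStep (d, n, s) p
          = (d, PySem.Set.add n (PySem.Str.strip (((PySem.Dict.mk p.2).get? "name").getD "")), s) by
        simp [pvAStep, hmid]]
      exact ih _ _ _ hs
    · by_cases hc : (PySem.Dict.contains d (normalize_meter_id ((PySem.Dict.mk p.2).get? "id"))) = true
      · rw [show pvAStep (d, n, s) p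
            = (d, PySem.Set.add n (PySem.Str.strip (((PySem.Dict.mk p.2).get? "name").getD "")),
               PySem.Set.add s (normalize_meter_id ((PySem.Dict.mk p.2).get? "id"))) by
          simp [pvAStep, hmid, hc]]
        exact ih _ _ _ (PySem.Set.nodup_add _ _ hs)
      · rw [show pvAStep (d, n, s) p
            = (d.insert (normalize_meter_id ((PySem.Dict.mk p.2).get? "id")) p.1,
               PySem.Set.add n (PySem.Str.strip (((PySem.Dict.mk p.2).get? "name").getD "")), s) by
          simp [pvAStep, hmid, hc]]
        exact ih _ _ _ hs

-- B's duplicate list, reshaped: the distinct ids whose count exceeds one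
theorem pvB_dup_list (xs : List String) :
    (((PySem.Dict.counter xs).items.filter (fun p => decide (1 < p.2))).map (·.1))
      = (PySem.Set.ofList xs).filter (fun k => decide (1 < (xs.count k : Int))) := by
  rw [PySem.Dict.items_counter]
  rw [List.filter_map, List.map_map]
  simp [Function.comp_def]

-- ===== VERDICT (by name: the statement is the Claim_ definition above) =====
theorem build_existing_meter_maps_spec : Claim_equal_build_existing_meter_maps := by
  intro cfg _
  show build_existing_meter_maps cfg = build_existing_meter_maps_alt cfg
  have hproj := pvA_proj (PySem.List.enumerate ((PySem.Dict.mk cfg).getD "meters" []))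
    PySem.Dict.empty PySem.Set.empty PySem.Set.empty
  have hids : pvIdsE (PySem.List.enumerate ((PySem.Dict.mk cfg).getD "meters" []))
      = pvIds ((PySem.Dict.mk cfg).getD "meters" []) := by
    simp [pvIdsE, PySem.List.map_snd_enumerate]
  refine Prod.ext ?_ (Prod.ext ?_ ?_)
  · exact congrArg (fun q => PySem.Dict.items q.1) hproj
  · exact congrArg (fun q => q.2) hproj
  · show PySem.List.sorted
        ((PySem.List.enumerate ((PySem.Dict.mk cfg).getD "meters" [])).foldl pvAStep
          (PySem.Dict.empty, PySem.Set.empty, PySem.Set.empty)).2.2 (fun x => x)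
      = PySem.List.sorted
        (((((PySem.Dict.mk cfg).getD "meters" []).foldl pvCountStep PySem.Dict.empty).items.filter
            (fun p => decide (1 < p.2))).map (·.1)) (fun x => x)
    rw [pvCounts_eq, pvB_dup_list]
    apply PySem.List.sorted_eq_sorted_of_perm _ _ _ (fun a b h => h)
    refine (List.perm_ext_iff_of_nodup
      (pvA_dups_nodup _ _ _ _ List.nodup_nil)
      ((PySem.Set.nodup_ofList _).filter _)).mpr ?_
    intro a
    rw [pvA_dups_mem, hids]
    simp only [List.mem_filter, PySem.Set.mem_ofList, decide_eq_true_eq,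
      List.not_mem_nil, false_or, PySem.Dict.contains_empty]
    constructor
    · rintro (⟨hf, -⟩ | h)
      · exact absurd hf (by simp)
      · exact ⟨List.count_pos_iff.mp (by omega), by omega⟩
    · rintro ⟨hmem, hcnt⟩
      exact Or.inr (by omega)
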